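-- pv_equiv track=rewrite | github.com/wcrainshaw-eng/permitgrab | onboard.py | _find_date_field
-- ===== SOURCE A (Python) =====
-- def _find_date_field(col_names):
--     for candidate in ['issue_date', 'issued_date', 'issueddate', 'permit_issued_date',
--                       'filed_date', 'fileddate', 'applied_date', 'application_date',
--                       'created_date', 'status_date', 'date']:
--         for c in col_names:
--             if candidate in c.lower():
--                 return c
--     for c in col_names:
--         if 'date' in c.lower() and not c.startswith(':'):
--             return c
--     return None
-- ===== SOURCE B (Python) =====
-- _CANDIDATES = ['issue_date', 'issued_date', 'issueddate', 'permit_issued_date',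
--                'filed_date', 'fileddate', 'applied_date', 'application_date',
--                'created_date', 'status_date', 'date']
--
-- def _find_date_field(col_names):
--     best = None  # (priority, column)
--     for c in col_names:
--         low = c.lower()
--         pri = next((p for p, cand in enumerate(_CANDIDATES) if cand in low), None)
--         if pri is not None and (best is None or pri < best[0]):
--             best = (pri, c)
--     return None if best is None else best[1]
-- ===== Notes on version B (the rewrite author's own statement) =====
-- stated objective: alternative
-- what changed: Replaced A's candidate-major repeated scans of col_names (plus a dead fallback loop) with a single column-major pass that keeps a running argmin of (candidate priority, column).
import Mathlib
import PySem

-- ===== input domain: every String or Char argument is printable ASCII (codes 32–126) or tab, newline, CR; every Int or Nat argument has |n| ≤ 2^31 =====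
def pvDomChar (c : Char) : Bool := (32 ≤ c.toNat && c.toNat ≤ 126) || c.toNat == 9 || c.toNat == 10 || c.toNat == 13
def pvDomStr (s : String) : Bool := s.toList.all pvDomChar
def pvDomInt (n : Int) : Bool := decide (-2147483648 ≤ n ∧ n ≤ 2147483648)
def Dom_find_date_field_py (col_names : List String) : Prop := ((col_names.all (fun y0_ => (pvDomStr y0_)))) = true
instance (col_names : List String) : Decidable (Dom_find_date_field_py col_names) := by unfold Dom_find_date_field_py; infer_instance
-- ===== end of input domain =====

-- B replaces A's candidate-major repeated scans with one column-major pass keeping a running argmin of (candidate priority, column); same result, alternative decomposition.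

def pvCandidates : List String :=
  ["issue_date", "issued_date", "issueddate", "permit_issued_date",
   "filed_date", "fileddate", "applied_date", "application_date",
   "created_date", "status_date", "date"]

-- ===== PORT A =====
def find_date_field_py (col_names : List String) : Option String :=
  match pvCandidates.findSome?
      (fun cand => col_names.find? (fun c => PySem.Str.isIn cand (PySem.Str.lower c))) with
  | some c => some c
  | none =>
    col_names.find? (fun c =>
      PySem.Str.isIn "date" (PySem.Str.lower c) && !(PySem.Str.startswith c ":"))

-- ===== PORT B =====
-- loop body of Source B: fold the next column into the running best (priority, column)
def pvStepB (best : Option (Nat × String)) (c : String) : Option (Nat × String) :=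
  match pvCandidates.findIdx? (fun cand => PySem.Str.isIn cand (PySem.Str.lower c)) with
  | none => best
  | some pri =>
    match best with
    | none => some (pri, c)
    | some b => if pri < b.1 then some (pri, c) else some b

def find_date_field_py_alt (col_names : List String) : Option String :=
  (col_names.foldl pvStepB none).map Prod.snd

-- ===== PRECONDITION & SPEC =====
def Spec_find_date_field_py (col_names : List String) (out : Option String) : Prop := out = find_date_field_py_alt col_names
instance (col_names : List String) (out : Option String) : Decidable (Spec_find_date_field_py col_names out) := by unfold Spec_find_date_field_py; infer_instance

-- ===== CLAIM (what is proved, stated in full; the proofs are below) =====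
def Claim_equal_find_date_field_py : Prop := ∀ (col_names : List String), Dom_find_date_field_py col_names → Spec_find_date_field_py col_names (find_date_field_py col_names)

-- ===== LEMMAS AND PROOFS =====

-- first index (within `cands`) of a candidate matching column x, argmin over columns, ties to the earliest column
def pvArgm {γ α : Type} (Q : γ → α → Bool) (cands : List γ) : List α → Option (Nat × α)
  | [] => none
  | x :: t =>
    match cands.findIdx? (fun k => Q k x), pvArgm Q cands t with
    | none, r => r
    | some p, none => some (p, x)
    | some p, some qd => if p ≤ qd.1 then some (p, x) else some qd

def pvMerge {α : Type} (b r : Option (Nat × α)) : Option (Nat × α) :=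
  match b, r with
  | none, r => r
  | some bb, none => some bb
  | some bb, some rr => if rr.1 < bb.1 then some rr else some bb

theorem pvArgm_nil {γ α : Type} (Q : γ → α → Bool) (cands : List γ) :
    pvArgm Q cands [] = none := rfl

theorem pvArgm_cons {γ α : Type} (Q : γ → α → Bool) (cands : List γ) (x : α) (t : List α) :
    pvArgm Q cands (x :: t) =
      match cands.findIdx? (fun k => Q k x), pvArgm Q cands t with
      | none, r => r
      | some p, none => some (p, x)
      | some p, some qd => if p ≤ qd.1 then some (p, x) else some qd := rfl

-- findIdx? of a disjunction is the min of the two findIdx?s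
theorem pv_findIdx?_or {γ : Type} (l : List γ) (a b : γ → Bool) :
    l.findIdx? (fun k => a k || b k) =
      match l.findIdx? a, l.findIdx? b with
      | none, r => r
      | some p, none => some p
      | some p, some q => some (min p q) := by
  induction l with
  | nil => simp
  | cons hd tl ih =>
    by_cases ha : a hd
    · by_cases hb : b hd
      · simp [List.findIdx?_cons, ha, hb]
      · simp [List.findIdx?_cons, ha, hb]
        cases tl.findIdx? b <;> simp
    · by_cases hb : b hd
      · simp [List.findIdx?_cons, ha, hb]
        cases tl.findIdx? a <;> simp
      · simp [List.findIdx?_cons, ha, hb, ih]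
        cases hA : tl.findIdx? a <;> cases hB : tl.findIdx? b <;> simp
-- split a findSome? whose body is "if u k then some c else g k"
theorem pv_findSome?_split {γ β : Type} (cands : List γ) (u v : γ → Bool) (c : β)
    (g : γ → Option β) (hv : ∀ k, (g k).isSome = v k) :
    cands.findSome? (fun k => if u k then some c else g k) =
      match cands.findIdx? u, cands.findIdx? v with
      | none, _ => cands.findSome? g
      | some _, none => some c
      | some p, some q => if p ≤ q then some c else cands.findSome? g := by
  induction cands with
  | nil => simp
  | cons hd tl ih =>
    by_cases hu : u hd
    · by_cases hw : v hd
      · simp [List.findIdx?_cons, hu, hw]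
      · simp [List.findIdx?_cons, hu, hw]
        cases tl.findIdx? v <;> simp
    · by_cases hw : v hd
      · have hg : (g hd).isSome = true := (hv hd).trans (by simp [hw])
        obtain ⟨w, hww⟩ := Option.isSome_iff_exists.mp hg
        simp [List.findIdx?_cons, hu, hw, hww]
        cases tl.findIdx? u <;> simp
      · have hg : g hd = none := by
          have h1 := (hv hd).trans (by simp [hw] : v hd = false)
          exact Option.not_isSome_iff_eq_none.mp (by simp [h1])
        simp [List.findIdx?_cons, hu, hw, hg, ih]
        cases hA : tl.findIdx? u <;> cases hB : tl.findIdx? v <;> simp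

-- the minimal per-column priority over t is the first candidate index matching some column of t
theorem pvArgm_fst {γ α : Type} (Q : γ → α → Bool) (cands : List γ) (t : List α) :
    (pvArgm Q cands t).map Prod.fst = cands.findIdx? (fun k => t.any (fun x => Q k x)) := by
  induction t with
  | nil =>
    rw [pvArgm_nil]
    exact (List.findIdx?_eq_none_iff.mpr (by simp)).symm
  | cons x t ih =>
    have hb : (fun k => (x :: t).any (fun y => Q k y)) =
        fun k => Q k x || t.any (fun y => Q k y) := by funext k; simp
    rw [hb, pv_findIdx?_or, ← ih, pvArgm_cons]
    cases hp : cands.findIdx? (fun k => Q k x) with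
    | none => cases hq : pvArgm Q cands t <;> simp
    | some p =>
      cases hq : pvArgm Q cands t with
      | none => simp
      | some qd =>
        by_cases h : p ≤ qd.1
        · simp [h]
        · simp [h, Nat.min_eq_right (Nat.le_of_not_le h)]

theorem pv_find?_isSome {γ α : Type} (Q : γ → α → Bool) (k : γ) (t : List α) :
    (t.find? (fun y => Q k y)).isSome = t.any (fun y => Q k y) := by
  induction t with
  | nil => simp
  | cons y t ih => by_cases h : Q k y <;> simp [h, ih]

-- A's candidate-major double scan computes the (priority, earliest-column) argmin
theorem pv_core_eq_argm {γ α : Type} (Q : γ → α → Bool) (cands : List γ) (xs : List α) :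
    cands.findSome? (fun k => xs.find? (fun x => Q k x)) = (pvArgm Q cands xs).map Prod.snd := by
  induction xs with
  | nil => simp [pvArgm_nil]
  | cons x t ih =>
    have hbody : (fun k => (x :: t).find? (fun y => Q k y)) =
        fun k => if Q k x then some x else t.find? (fun y => Q k y) := by
      funext k; simp [List.find?_cons]; split <;> simp_all
    rw [hbody,
      pv_findSome?_split cands (fun k => Q k x) (fun k => t.any (fun y => Q k y)) x
        (fun k => t.find? (fun y => Q k y)) (fun k => pv_find?_isSome Q k t),
      ← pvArgm_fst, ih, pvArgm_cons]
    cases hp : cands.findIdx? (fun k => Q k x) with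
    | none => cases hq : pvArgm Q cands t <;> simp
    | some p =>
      cases hq : pvArgm Q cands t with
      | none => simp
      | some qd => by_cases h : p ≤ qd.1 <;> simp [h]

theorem pvMerge_none {α : Type} (r : Option (Nat × α)) : pvMerge none r = r := by
  cases r <;> rfl

-- B's fold over a list extends the accumulator by the list's argmin
theorem pv_fold_eq_merge (xs : List String) (b : Option (Nat × String)) :
    xs.foldl pvStepB b =
      pvMerge b (pvArgm (fun cand c => PySem.Str.isIn cand (PySem.Str.lower c)) pvCandidates xs) := by
  induction xs generalizing b with
  | nil => cases b <;> simp [pvArgm_nil, pvMerge]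
  | cons x t ih =>
    rw [List.foldl_cons, ih, pvArgm_cons]
    simp only [pvStepB]
    cases hp : pvCandidates.findIdx? (fun cand => PySem.Str.isIn cand (PySem.Str.lower x)) with
    | none =>
      cases hq : pvArgm (fun cand c => PySem.Str.isIn cand (PySem.Str.lower c)) pvCandidates t <;>
        cases b <;> simp [pvMerge]
    | some p =>
      cases hq : pvArgm (fun cand c => PySem.Str.isIn cand (PySem.Str.lower c)) pvCandidates t with
      | none =>
        cases b with
        | none => simp [pvMerge]
        | some bb => by_cases h : p < bb.1 <;> simp [pvMerge, h]
      | some qd =>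
        rcases qd with ⟨q, d⟩
        cases b with
        | none =>
          by_cases h : p ≤ q
          · simp [pvMerge, h, Nat.not_lt.mpr h]
          · simp [pvMerge, h, Nat.not_le.mp h]
        | some bb =>
          rcases bb with ⟨bp, bd⟩
          by_cases h1 : p < bp
          · by_cases h2 : p ≤ q
            · simp [pvMerge, h1, h2, Nat.not_lt.mpr h2]
            · have h3 : q < p := Nat.not_le.mp h2
              simp [pvMerge, h1, h2, h3, Nat.lt_trans h3 h1]
          · by_cases h2 : p ≤ q
            · have h4 : ¬ q < bp := fun hq4 =>
                (Nat.not_lt.mpr (Nat.le_trans (Nat.not_lt.mp h1) h2)) hq4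
              simp [pvMerge, h1, h2, h4]
            · simp [pvMerge, h1, h2]

-- ===== VERDICT (by name: the statement is the Claim_ definition above) =====
theorem find_date_field_py_spec : Claim_equal_find_date_field_py := by
  intro xs _
  unfold Spec_find_date_field_py find_date_field_py find_date_field_py_alt
  rw [pv_fold_eq_merge xs none, pvMerge_none]
  cases hcore : pvCandidates.findSome?
      (fun cand => xs.find? (fun c => PySem.Str.isIn cand (PySem.Str.lower c))) with
  | some c =>
    rw [pv_core_eq_argm (fun cand c => PySem.Str.isIn cand (PySem.Str.lower c)) pvCandidates xs]
      at hcore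
    exact hcore.symm
  | none =>
    -- A's fallback is dead: "date" is itself a candidate, so no column contains "date" here
    have hdate : xs.find? (fun c => PySem.Str.isIn "date" (PySem.Str.lower c)) = none :=
      List.findSome?_eq_none_iff.mp hcore "date" (by simp [pvCandidates])
    have hall := List.find?_eq_none.mp hdate
    have hfb : xs.find? (fun c =>
        PySem.Str.isIn "date" (PySem.Str.lower c) && !(PySem.Str.startswith c ":")) = none := by
      apply List.find?_eq_none.mpr
      intro c hc
      have h2 := hall c hc
      simp at h2 ⊢
      simp [h2]
    rw [pv_core_eq_argm (fun cand c => PySem.Str.isIn cand (PySem.Str.lower c)) pvCandidates xs]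
      at hcore
    rw [hcore, hfb]
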